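-- pv_equiv track=rewrite | github.com/ookok/LivingTreeAlAgent | client/src/business/fusion_rag/data_flow_optimizer.py | build_execution_graph
-- ===== SOURCE A (Python) =====
-- from typing import List, Dict, Any, Optional, Set, Tuple
--
-- def build_execution_graph(dependencies: Dict[str, List[str]]) -> Dict[str, List[str]]:
--     """
--     构建执行图
--
--     Args:
--         dependencies: 依赖关系
--
--     Returns:
--         执行图
--     """
--     # 反转依赖关系，构建执行顺序图
--     execution_graph = {}
--
--     for module, deps in dependencies.items():
--         for dep in deps:
--             if dep not in execution_graph:
--                 execution_graph[dep] = []
--             if module not in execution_graph[dep]: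
--                 execution_graph[dep].append(module)
--
--     return execution_graph
-- ===== SOURCE B (Python) =====
-- def build_execution_graph(dependencies):
--     # Key sequence of the result: deps in order of first appearance.
--     dep_order = list(dict.fromkeys(d for deps in dependencies.values() for d in deps))
--     # Each adjacency list is computed independently by one scan of the modules;
--     # no dedup is needed because dict keys (modules) are unique.
--     return {dep: [m for m, deps in dependencies.items() if dep in deps]
--             for dep in dep_order}
-- ===== Notes on version B (the rewrite author's own statement) =====
-- stated objective: alternative
-- what changed: A builds the graph in one pass by mutating a dict per edge (create key on first sight, membership-checked append); B never mutates a dict: it first computes the result's key sequence as the ordered dedup of all flattened deps, then constructs each adjacency list independently by filtering the module list for modules that depend on that key (no per-list dedup needed since dict keys are unique).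
import Mathlib
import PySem

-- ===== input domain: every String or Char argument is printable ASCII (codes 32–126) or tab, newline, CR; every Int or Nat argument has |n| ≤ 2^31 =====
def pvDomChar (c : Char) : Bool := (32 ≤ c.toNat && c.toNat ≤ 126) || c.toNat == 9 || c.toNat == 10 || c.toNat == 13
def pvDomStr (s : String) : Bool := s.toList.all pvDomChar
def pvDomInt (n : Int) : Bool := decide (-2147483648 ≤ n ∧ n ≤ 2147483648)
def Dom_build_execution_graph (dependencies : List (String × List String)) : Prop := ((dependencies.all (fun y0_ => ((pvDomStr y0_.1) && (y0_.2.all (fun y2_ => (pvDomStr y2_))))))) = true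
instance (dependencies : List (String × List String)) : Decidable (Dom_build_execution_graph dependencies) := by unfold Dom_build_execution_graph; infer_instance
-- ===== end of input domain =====

-- B replaces A's per-edge dict mutation by first computing the result's key order (ordered dedup of all deps) and then building each adjacency list by an independent scan of the modules (alternative decomposition, not faster).


-- ===== PORT A =====
-- body of A's inner loop: ensure the key exists, then append module if not already present
def pvAStep (module : String) (g : PySem.Dict String (List String)) (dep : String) :
    PySem.Dict String (List String) :=
  let g1 := if g.contains dep then g else g.insert dep []
  if (g1.getD dep []).contains module then g1 else g1.modify dep [] (fun v => v ++ [module])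

def build_execution_graph (dependencies : List (String × List String)) : List (String × List String) :=
  (dependencies.foldl (fun g p => p.2.foldl (pvAStep p.1) g) PySem.Dict.empty).items

-- ===== PORT B =====
def build_execution_graph_alt (dependencies : List (String × List String)) : List (String × List String) :=
  let depOrder := PySem.List.dedup (dependencies.flatMap (fun p => p.2))
  depOrder.map (fun dep => (dep, (dependencies.filter (fun p => p.2.contains dep)).map Prod.fst))

-- ===== PRECONDITION & SPEC =====
-- Pre_ requires distinct keys: the Python argument is a dict, so a duplicate-key association list corresponds to no Python input.
def Pre_build_execution_graph (dependencies : List (String × List String)) : Prop :=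
  (dependencies.map Prod.fst).Nodup
instance (dependencies : List (String × List String)) : Decidable (Pre_build_execution_graph dependencies) := by unfold Pre_build_execution_graph; infer_instance

def pvWitness_build_execution_graph : (List (String × List String)) := [("a", ["b", "c"]), ("b", ["c"])]

def Spec_build_execution_graph (dependencies : List (String × List String)) (out : List (String × List String)) : Prop := out = build_execution_graph_alt dependencies
instance (dependencies : List (String × List String)) (out : List (String × List String)) : Decidable (Spec_build_execution_graph dependencies out) := by unfold Spec_build_execution_graph; infer_instance

-- ===== CLAIM (what is proved, stated in full; the proofs are below) =====
def Claim_equal_build_execution_graph : Prop := ∀ (dependencies : List (String × List String)), Dom_build_execution_graph dependencies → Pre_build_execution_graph dependencies → Spec_build_execution_graph dependencies (build_execution_graph dependencies)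

-- ===== LEMMAS AND PROOFS =====

-- the adjacency list B computes for key `dep` out of the modules `ds`
def pvOV (ds : List (String × List String)) (dep : String) : List String :=
  (ds.filter (fun p => p.2.contains dep)).map Prod.fst

-- value held at key `dep` midway through A's processing of module `m` (deps `ts` already done)
def pvF (ds : List (String × List String)) (m : String) (ts : List String) (dep : String) : List String :=
  pvOV ds dep ++ (if ts.contains dep then [m] else [])

-- invariant state of A's loop: modules `ds` done, current module `m`, deps `ts` of `m` done
def pvG (ds : List (String × List String)) (m : String) (ts : List String) : List (String × List String) :=
  (PySem.List.dedup (ds.flatMap (fun p => p.2) ++ ts)).map (fun k => (k, pvF ds m ts k))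

theorem pvAStep_eq (module : String) (g : PySem.Dict String (List String)) (dep : String) :
    pvAStep module g dep =
      if (((if g.contains dep then g else g.insert dep []).getD dep []).contains module) then
        (if g.contains dep then g else g.insert dep [])
      else (if g.contains dep then g else g.insert dep []).modify dep [] (fun v => v ++ [module]) := rfl

theorem pvMem_pvOV {ds : List (String × List String)} {dep x : String}
    (h : x ∈ pvOV ds dep) : x ∈ ds.map Prod.fst := by
  unfold pvOV at h
  rcases List.mem_map.1 h with ⟨p, hp, rfl⟩
  exact List.mem_map_of_mem (List.mem_of_mem_filter hp)

theorem pvOV_eq_nil {ds : List (String × List String)} {d : String}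
    (h : d ∉ ds.flatMap (fun p => p.2)) : pvOV ds d = [] := by
  unfold pvOV
  rw [List.filter_eq_nil_iff.2, List.map_nil]
  intro p hp
  simp only [List.contains_eq_mem, decide_eq_true_eq]
  exact fun hx => h (List.mem_flatMap.2 ⟨p, hp, hx⟩)

theorem pvGet?_keymap (L : List String) (f : String → List String) (d : String) :
    (PySem.Dict.mk (L.map (fun k => (k, f k)))).get? d = if d ∈ L then some (f d) else none := by
  induction L with
  | nil => simp [PySem.Dict.get?]
  | cons k t ih =>
      rw [List.map_cons, PySem.Dict.get?_mk_cons]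
      by_cases h : k = d
      · simp [h]
      · simp [h, ih, Ne.symm h]

theorem pvContains_keymap (L : List String) (f : String → List String) (d : String) :
    (PySem.Dict.mk (L.map (fun k => (k, f k)))).contains d = decide (d ∈ L) := by
  rw [PySem.Dict.contains_eq_isSome_get?, pvGet?_keymap]
  by_cases h : d ∈ L <;> simp [h]

theorem pvGetD_keymap (L : List String) (f : String → List String) (d : String) (hd : d ∈ L) :
    (PySem.Dict.mk (L.map (fun k => (k, f k)))).getD d [] = f d := by
  rw [PySem.Dict.getD_eq_get?_getD, pvGet?_keymap, if_pos hd]; rfl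

theorem pvInsert_keymap_mem (L : List String) (f : String → List String) (d : String)
    (v : List String) (hd : d ∈ L) :
    (PySem.Dict.mk (L.map (fun k => (k, f k)))).insert d v
      = PySem.Dict.mk (L.map (fun k => (k, if k = d then v else f k))) := by
  apply PySem.Dict.ext
  rw [PySem.Dict.items_insert, pvContains_keymap, decide_eq_true hd, if_pos rfl]
  show (L.map (fun k => (k, f k))).map (fun p => if p.1 == d then (d, v) else p)
      = L.map (fun k => (k, if k = d then v else f k))
  rw [List.map_map]
  apply List.map_congr_left
  intro k _
  by_cases h : k = d <;> simp [h]

theorem pvInsert_keymap_not_mem (L : List String) (f : String → List String) (d : String)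
    (v : List String) (hd : d ∉ L) :
    (PySem.Dict.mk (L.map (fun k => (k, f k)))).insert d v
      = PySem.Dict.mk (L.map (fun k => (k, f k)) ++ [(d, v)]) := by
  apply PySem.Dict.ext
  rw [PySem.Dict.items_insert, pvContains_keymap, decide_eq_false hd, if_neg (by simp)]

theorem pvGet?_keymap_append (L : List String) (f : String → List String) (d : String)
    (v : List String) (hd : d ∉ L) :
    (PySem.Dict.mk (L.map (fun k => (k, f k)) ++ [(d, v)])).get? d = some v := by
  induction L with
  | nil => simp [PySem.Dict.get?_mk_cons]
  | cons k t ih =>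
      rw [List.map_cons, List.cons_append, PySem.Dict.get?_mk_cons]
      have hk : k ≠ d := fun h => hd (h ▸ List.mem_cons_self ..)
      simp only [hk, beq_iff_eq, if_false]
      exact ih (fun h => hd (List.mem_cons_of_mem _ h))

theorem pvInsert_keymap_append (L : List String) (f : String → List String) (d : String)
    (v w : List String) (hd : d ∉ L) :
    (PySem.Dict.mk (L.map (fun k => (k, f k)) ++ [(d, v)])).insert d w
      = PySem.Dict.mk (L.map (fun k => (k, f k)) ++ [(d, w)]) := by
  apply PySem.Dict.ext
  have hc : (PySem.Dict.mk (L.map (fun k => (k, f k)) ++ [(d, v)])).contains d = true := by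
    rw [PySem.Dict.contains_eq_isSome_get?, pvGet?_keymap_append L f d v hd]; rfl
  rw [PySem.Dict.items_insert, hc, if_pos rfl]
  show (L.map (fun k => (k, f k)) ++ [(d, v)]).map (fun p => if p.1 == d then (d, w) else p) = _
  rw [List.map_append, List.map_map]
  congr 1
  · apply List.map_congr_left
    intro k hk
    have : k ≠ d := fun h => hd (h ▸ hk)
    simp [this]
  · simp

theorem pvDedup_append (v : List String) (a : String) :
    PySem.List.dedup (v ++ [a])
      = if a ∈ v then PySem.List.dedup v else PySem.List.dedup v ++ [a] := by
  have h1 : PySem.List.dedup (v ++ [a]) = PySem.Set.add (PySem.Set.ofList v) a := by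
    simp [PySem.List.dedup, PySem.Set.ofList, List.foldl_append]
  rw [h1, PySem.Set.add]
  by_cases h : a ∈ v
  · have : a ∈ PySem.Set.ofList v := (PySem.Set.mem_ofList v a).2 h
    simp [PySem.List.dedup, this, h]
  · have : a ∉ PySem.Set.ofList v := fun hx => h ((PySem.Set.mem_ofList v a).1 hx)
    simp [PySem.List.dedup, h, this]

-- one step of A's inner loop preserves the invariant
theorem pvStep (ds : List (String × List String)) (m : String) (hm : m ∉ ds.map Prod.fst)
    (ts : List String) (d : String) :
    pvAStep m (PySem.Dict.mk (pvG ds m ts)) d = PySem.Dict.mk (pvG ds m (ts ++ [d])) := by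
  have hmOV : ∀ dep, (pvOV ds dep).contains m = false := by
    intro dep
    simp only [List.contains_eq_mem, decide_eq_false_iff_not]
    exact fun hx => hm (pvMem_pvOV hx)
  rw [pvAStep_eq]
  by_cases hd : d ∈ ds.flatMap (fun p => p.2) ++ ts
  · have hdL : d ∈ PySem.List.dedup (ds.flatMap (fun p => p.2) ++ ts) := by
      rw [PySem.List.mem_dedup]; exact hd
    have hc : (PySem.Dict.mk (pvG ds m ts)).contains d = true := by
      rw [pvG, pvContains_keymap]; exact decide_eq_true hdL
    have hg : (PySem.Dict.mk (pvG ds m ts)).getD d [] = pvF ds m ts d := by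
      rw [pvG]; exact pvGetD_keymap _ _ _ hdL
    rw [hc]
    simp only [reduceIte]
    rw [hg]
    have hded : PySem.List.dedup (ds.flatMap (fun p => p.2) ++ (ts ++ [d]))
        = PySem.List.dedup (ds.flatMap (fun p => p.2) ++ ts) := by
      rw [← List.append_assoc, pvDedup_append, if_pos hd]
    by_cases ht : d ∈ ts
    · have hcm : (pvF ds m ts d).contains m = true := by
        simp [pvF, List.contains_eq_mem, ht]
      rw [hcm]
      simp only [reduceIte]
      rw [pvG, pvG, hded]
      apply congrArg
      apply List.map_congr_left
      intro k _
      by_cases hk : k = d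
      · subst hk; simp [pvF, List.contains_eq_mem, ht]
      · simp [pvF, List.contains_eq_mem, hk]
    · have hm' : m ∉ pvOV ds d := fun hx => hm (pvMem_pvOV hx)
      have hcm : (pvF ds m ts d).contains m = false := by
        simp [pvF, List.contains_eq_mem, ht, hm']
      rw [hcm]
      simp only [Bool.false_eq_true, if_false]
      rw [PySem.Dict.modify, hg]
      have hfd : pvF ds m ts d = pvOV ds d := by simp [pvF, List.contains_eq_mem, ht]
      rw [hfd, pvG, pvInsert_keymap_mem _ _ _ _ hdL, pvG, hded]
      apply congrArg
      apply List.map_congr_left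
      intro k _
      by_cases hk : k = d
      · subst hk; simp [pvF, List.contains_eq_mem, ht]
      · simp [pvF, List.contains_eq_mem, hk]
  · have hdL : d ∉ PySem.List.dedup (ds.flatMap (fun p => p.2) ++ ts) := by
      rw [PySem.List.mem_dedup]; exact hd
    have hc : (PySem.Dict.mk (pvG ds m ts)).contains d = false := by
      rw [pvG, pvContains_keymap]; exact decide_eq_false hdL
    rw [hc]
    simp only [Bool.false_eq_true, if_false]
    rw [pvG, pvInsert_keymap_not_mem _ _ _ _ hdL]
    have hgd : (PySem.Dict.mk
        ((PySem.List.dedup (ds.flatMap (fun p => p.2) ++ ts)).map (fun k => (k, pvF ds m ts k))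
          ++ [(d, [])])).getD d [] = [] := by
      rw [PySem.Dict.getD_eq_get?_getD, pvGet?_keymap_append _ _ _ _ hdL]; rfl
    rw [hgd]
    simp only [List.contains_nil, Bool.false_eq_true, if_false]
    rw [PySem.Dict.modify, hgd, pvInsert_keymap_append _ _ _ _ _ hdL]
    rw [pvG, ← List.append_assoc, pvDedup_append, if_neg hd, List.map_append]
    apply congrArg
    congr 1
    · apply List.map_congr_left
      intro k hk
      have hkd : k ≠ d := fun h => hdL (h ▸ hk)
      simp [pvF, List.contains_eq_mem, hkd]
    · have hflat : d ∉ ds.flatMap (fun p => p.2) := fun h => hd (List.mem_append_left _ h)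
      simp [pvF, List.contains_eq_mem, pvOV_eq_nil hflat]

-- A's inner loop, run from the invariant state
theorem pvInner (ds : List (String × List String)) (m : String) (hm : m ∉ ds.map Prod.fst)
    (rest : List String) :
    ∀ ts : List String,
      rest.foldl (pvAStep m) (PySem.Dict.mk (pvG ds m ts)) = PySem.Dict.mk (pvG ds m (ts ++ rest)) := by
  induction rest with
  | nil => intro ts; simp
  | cons d t ih =>
      intro ts
      rw [List.foldl_cons, pvStep ds m hm ts d, ih (ts ++ [d]), List.append_assoc]
      rfl

theorem pvG_nil (ds : List (String × List String)) (m : String) :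
    pvG ds m [] = build_execution_graph_alt ds := by
  unfold pvG pvF build_execution_graph_alt
  simp [pvOV]

theorem pvG_snoc (ds : List (String × List String)) (m : String) (deps : List String) :
    pvG ds m deps = build_execution_graph_alt (ds ++ [(m, deps)]) := by
  unfold pvG pvF build_execution_graph_alt
  simp only [List.flatMap_append, List.flatMap_cons, List.flatMap_nil, List.append_nil]
  apply List.map_congr_left
  intro dep _
  simp only [pvOV, List.filter_append, List.map_append]
  by_cases h : dep ∈ deps <;>
    simp [List.contains_eq_mem, h]

theorem pvMain (ds : List (String × List String)) (hnd : (ds.map Prod.fst).Nodup) :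
    ds.foldl (fun g p => p.2.foldl (pvAStep p.1) g) PySem.Dict.empty
      = PySem.Dict.mk (build_execution_graph_alt ds) := by
  induction ds using List.reverseRecOn with
  | nil => rfl
  | append_singleton ds p ih =>
      rw [List.map_append, List.map_cons, List.map_nil] at hnd
      have hds := (List.nodup_append.1 hnd).1
      have hm : p.1 ∉ ds.map Prod.fst := fun hx =>
        (List.nodup_append.1 hnd).2.2 p.1 hx p.1 (List.mem_singleton_self p.1) rfl
      rw [List.foldl_append, ih hds, List.foldl_cons, List.foldl_nil, ← pvG_nil ds p.1,
        pvInner ds p.1 hm p.2 [], List.nil_append, pvG_snoc]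

-- ===== VERDICT (by name: the statement is the Claim_ definition above) =====
theorem build_execution_graph_spec : Claim_equal_build_execution_graph := by
  intro ds _ hpre
  unfold Spec_build_execution_graph build_execution_graph
  rw [pvMain ds hpre]
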